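-- pv_equiv track=rewrite | github.com/x0wllaar/AdventOfCode2024 | Day9/part2.py | find_next_free_extent
-- ===== SOURCE A (Python) =====
-- def find_next_free_extent(blocks, ptr):
--     start = None
--     end = None
--     for i in range(ptr, len(blocks)):
--         if blocks[i] is None and start is None:
--             start = i
--         if blocks[i] is None and start is not None:
--             end = i
--         if blocks[i] is not None and start is not None:
--             return start, end
--     return -1, -1
-- ===== SOURCE B (Python) =====
-- def find_next_free_extent(blocks, ptr):
--     vals = [blocks[i] for i in range(ptr, len(blocks))]
--     if None not in vals:
--         return -1, -1
--     s = vals.index(None)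
--     nonfree = [k for k, v in enumerate(vals) if k > s and v is not None]
--     if not nonfree:
--         return -1, -1
--     return ptr + s, ptr + nonfree[0] - 1
-- ===== Notes on version B (the rewrite author's own statement) =====
-- stated objective: alternative
-- what changed: Replaces the flag-driven stateful scan with a declarative decomposition: materialize the scanned window, locate the run start with list.index(None), and pick the first later non-None position from a filtered enumeration.
import Mathlib
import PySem

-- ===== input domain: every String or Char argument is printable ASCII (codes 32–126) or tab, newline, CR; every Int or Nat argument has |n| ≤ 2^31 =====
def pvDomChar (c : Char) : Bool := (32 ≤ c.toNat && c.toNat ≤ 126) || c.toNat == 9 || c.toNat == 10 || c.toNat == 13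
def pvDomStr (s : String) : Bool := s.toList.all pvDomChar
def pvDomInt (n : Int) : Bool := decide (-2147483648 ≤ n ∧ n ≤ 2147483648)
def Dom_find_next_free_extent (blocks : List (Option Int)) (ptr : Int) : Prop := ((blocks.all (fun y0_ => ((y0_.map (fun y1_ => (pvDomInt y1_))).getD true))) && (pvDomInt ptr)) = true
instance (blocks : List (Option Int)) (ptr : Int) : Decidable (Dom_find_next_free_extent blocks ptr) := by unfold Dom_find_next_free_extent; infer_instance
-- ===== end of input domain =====

-- B replaces A's flag-driven single scan by a declarative search on the materialized
-- window (index of first None, first later non-None position); same value on Pre_.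

-- ===== PORT A =====
-- the for-loop over range(ptr, len(blocks)) with state (start, end), early return on
-- hitting a used block after a free run; blocks[i] via pyGet? (negative i wraps; the
-- none (IndexError) case is excluded by Pre_, the value returned there is arbitrary)
def faLoop (blocks : List (Option Int)) : List Int → Option Int → Option Int → Int × Int
  | [], _, _ => (-1, -1)
  | i :: rest, st, en =>
    match PySem.List.pyGet? blocks i with
    | none => (-1, -1)  -- IndexError in Python; outside Pre_
    | some b =>
      let st' := if b.isNone && st.isNone then some i else st
      let en' := if b.isNone && st'.isSome then some i else en
      if b.isSome && st'.isSome then (st'.getD 0, en'.getD 0)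
      else faLoop blocks rest st' en'

def find_next_free_extent (blocks : List (Option Int)) (ptr : Int) : Int × Int :=
  faLoop blocks (PySem.List.pyRange ptr (blocks.length : Int) 1) none none

-- ===== PORT B =====
-- vals = [blocks[i] for i in range(ptr, len(blocks))]  (pyGet?: the IndexError case —
-- outside Pre_ — is flattened to none; inside Pre_ every visited index is valid)
def bVals (blocks : List (Option Int)) (ptr : Int) : List (Option Int) :=
  (PySem.List.pyRange ptr (blocks.length : Int) 1).map
    (fun i => (PySem.List.pyGet? blocks i).getD none)

-- the rest of Source B's body on the materialized window:
-- None-membership test, vals.index(None), the filtered enumeration, nonfree[0]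
def bCore (vals : List (Option Int)) (ptr : Int) : Int × Int :=
  if none ∈ vals then
    match PySem.List.index? vals none with
    | none => (-1, -1)  -- unreachable: none ∈ vals
    | some s =>
      match (PySem.List.enumerate vals 0).filterMap
          (fun kv => if (s : Int) < kv.1 ∧ kv.2.isSome then some kv.1 else none) with
      | [] => (-1, -1)
      | k :: _ => (ptr + s, ptr + k - 1)
  else (-1, -1)

def find_next_free_extent_alt (blocks : List (Option Int)) (ptr : Int) : Int × Int :=
  bCore (bVals blocks ptr) ptr

-- ===== PRECONDITION & SPEC =====
-- Pre_ excludes exactly the inputs where A raises IndexError: ptr below -len(blocks)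
-- makes the first access blocks[ptr] an out-of-range negative index (B raises there too).
def Pre_find_next_free_extent (blocks : List (Option Int)) (ptr : Int) : Prop :=
  -(blocks.length : Int) ≤ ptr
instance (blocks : List (Option Int)) (ptr : Int) : Decidable (Pre_find_next_free_extent blocks ptr) := by unfold Pre_find_next_free_extent; infer_instance

def pvWitness_find_next_free_extent : List (Option Int) × Int := ([some 1, none, none, some 2], 0)

def Spec_find_next_free_extent (blocks : List (Option Int)) (ptr : Int) (out : Int × Int) : Prop := out = find_next_free_extent_alt blocks ptr
instance (blocks : List (Option Int)) (ptr : Int) (out : Int × Int) : Decidable (Spec_find_next_free_extent blocks ptr out) := by unfold Spec_find_next_free_extent; infer_instance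

-- ===== CLAIM (what is proved, stated in full; the proofs are below) =====
def Claim_equal_find_next_free_extent : Prop := ∀ (blocks : List (Option Int)) (ptr : Int), Dom_find_next_free_extent blocks ptr → Pre_find_next_free_extent blocks ptr → Spec_find_next_free_extent blocks ptr (find_next_free_extent blocks ptr)

-- ===== LEMMAS AND PROOFS =====

lemma pyGet?_isSome_of_inRange (blocks : List (Option Int)) (i : Int)
    (h1 : -(blocks.length : Int) ≤ i) (h2 : i < (blocks.length : Int)) :
    ∃ b, PySem.List.pyGet? blocks i = some b := by
  cases hp : PySem.List.pyGet? blocks i with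
  | some b => exact ⟨b, rfl⟩
  | none =>
    rw [PySem.List.pyGet?_eq_none_iff] at hp
    exact absurd ⟨h1, h2⟩ hp

lemma bVals_nil (blocks : List (Option Int)) (i : Int) (h : (blocks.length : Int) ≤ i) :
    bVals blocks i = [] := by
  unfold bVals; rw [PySem.List.pyRange_one_eq_nil h]; rfl

lemma bVals_cons (blocks : List (Option Int)) (i : Int) (b : Option Int)
    (hlt : i < (blocks.length : Int)) (hb : PySem.List.pyGet? blocks i = some b) :
    bVals blocks i = b :: bVals blocks (i + 1) := by
  unfold bVals; rw [PySem.List.pyRange_one_cons hlt]; simp [hb]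

-- positions (enumerated from s) of the non-None entries of a window
def fsAux (l : List (Option Int)) (s : Int) : List Int :=
  (PySem.List.enumerate l s).filterMap (fun kv => if kv.2.isSome then some kv.1 else none)

lemma fsAux_nil (s : Int) : fsAux [] s = [] := rfl

lemma fsAux_cons_some (v : Int) (l : List (Option Int)) (s : Int) :
    fsAux (some v :: l) s = s :: fsAux l (s + 1) := by
  simp [fsAux, PySem.List.enumerate_cons]

lemma fsAux_cons_none (l : List (Option Int)) (s : Int) :
    fsAux (none :: l) s = fsAux l (s + 1) := by
  simp [fsAux, PySem.List.enumerate_cons]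

lemma fsAux_shift (l : List (Option Int)) (s : Int) :
    fsAux l s = (fsAux l 0).map (· + s) := by
  induction l generalizing s with
  | nil => simp [fsAux_nil]
  | cons b l ih =>
    cases b with
    | none =>
      rw [fsAux_cons_none, fsAux_cons_none, ih (s + 1), ih (0 + 1)]
      rw [List.map_map]
      apply List.map_congr_left; intro x _; simp; ring
    | some v =>
      rw [fsAux_cons_some, fsAux_cons_some, ih (s + 1), ih (0 + 1)]
      rw [List.map_cons, List.map_map]
      refine List.cons_eq_cons.mpr ⟨by ring, ?_⟩
      apply List.map_congr_left; intro x _; simp; ring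

lemma fsAux_nonneg (l : List (Option Int)) (s : Int) :
    ∀ k ∈ fsAux l s, s ≤ k := by
  induction l generalizing s with
  | nil => simp [fsAux_nil]
  | cons b l ih =>
    intro k hk
    cases b with
    | none =>
      rw [fsAux_cons_none] at hk
      have := ih (s + 1) k hk; omega
    | some v =>
      rw [fsAux_cons_some] at hk
      rcases List.mem_cons.mp hk with h | h
      · omega
      · have := ih (s + 1) k h; omega

-- split the conjunction inside Source B's comprehension: filter after the position map
lemma filterMap_and_eq_filter (l : List (Int × Option Int)) (s : Int) :
    l.filterMap (fun kv => if s < kv.1 ∧ kv.2.isSome then some kv.1 else none)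
      = (l.filterMap (fun kv => if kv.2.isSome then some kv.1 else none)).filter
          (fun k => decide (s < k)) := by
  induction l with
  | nil => simp
  | cons kv l ih =>
    by_cases h2 : kv.2.isSome
    · by_cases h1 : s < kv.1
      · simp [h1, h2, ih]
      · simp [h1, h2, ih]
    · simp [h2, ih]

lemma bCore_eq (vals : List (Option Int)) (p : Int) :
    bCore vals p =
      if none ∈ vals then
        match PySem.List.index? vals none with
        | none => (-1, -1)
        | some s =>
          match (fsAux vals 0).filter (fun k => decide ((s : Int) < k)) with
          | [] => (-1, -1)
          | k :: _ => (p + s, p + k - 1)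
      else (-1, -1) := by
  unfold bCore fsAux
  by_cases hm : none ∈ vals
  · rw [if_pos hm, if_pos hm]
    cases PySem.List.index? vals none with
    | none => rfl
    | some s =>
      simp only [filterMap_and_eq_filter]
  · rw [if_neg hm, if_neg hm]

lemma bCore_of_index? (vals : List (Option Int)) (p : Int) (s : ℕ)
    (hm : none ∈ vals) (hs : PySem.List.index? vals none = some s) :
    bCore vals p =
      (match (fsAux vals 0).filter (fun k => decide ((s : Int) < k)) with
       | [] => (-1, -1)
       | k :: _ => (p + s, p + k - 1)) := by
  rw [bCore_eq, if_pos hm, hs]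

lemma bCore_cons_some (v : Int) (rest : List (Option Int)) (p : Int) :
    bCore (some v :: rest) p = bCore rest (p + 1) := by
  by_cases hm : none ∈ rest
  · cases hs : PySem.List.index? rest (none : Option Int) with
    | none => rw [PySem.List.index?_eq_none_iff] at hs; exact absurd hm hs
    | some s =>
      rw [bCore_of_index? rest (p + 1) s hm hs]
      rw [bCore_of_index? (some v :: rest) p (s + 1) (by simp [hm])
        (by rw [PySem.List.index?_cons_of_ne rest (by simp), hs]; rfl)]
      rw [fsAux_cons_some, fsAux_shift rest (0 + 1)]
      rw [List.filter_cons]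
      have h0 : ¬ ((s + 1 : ℕ) : Int) < (0 : Int) := by push_cast; omega
      simp only [h0, decide_false, Bool.false_eq_true, if_false]
      rw [List.filter_map]
      have hcong : (fsAux rest 0).filter ((fun k => decide (((s + 1 : ℕ) : Int) < k)) ∘ (· + (0 + 1)))
          = (fsAux rest 0).filter (fun k => decide ((s : Int) < k)) := by
        apply List.filter_congr
        intro x _
        simp only [Function.comp]
        rw [decide_eq_decide]
        push_cast
        omega
      rw [hcong]
      cases (fsAux rest 0).filter (fun k => decide ((s : Int) < k)) with
      | nil => simp
      | cons k t =>
        simp only [List.map_cons, Prod.mk.injEq]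
        constructor
        · push_cast; ring
        · push_cast; ring
  · rw [bCore_eq, bCore_eq, if_neg (by simp [hm]), if_neg hm]

lemma bCore_cons_none (rest : List (Option Int)) (p : Int) :
    bCore (none :: rest) p = (match fsAux rest 0 with
      | [] => (-1, -1)
      | k :: _ => (p, p + k)) := by
  rw [bCore_of_index? (none :: rest) p 0 (List.mem_cons_self) (PySem.List.index?_cons_self _ _)]
  rw [fsAux_cons_none, fsAux_shift rest (0 + 1)]
  have hall : ((fsAux rest 0).map (· + (0 + 1))).filter (fun k => decide (((0 : ℕ) : Int) < k)) =
      (fsAux rest 0).map (· + (0 + 1)) := by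
    apply List.filter_eq_self.mpr
    intro k hk
    rcases List.mem_map.mp hk with ⟨x, hx, rfl⟩
    have := fsAux_nonneg rest 0 x hx
    simp only [decide_eq_true_iff]
    push_cast
    omega
  rw [hall]
  cases fsAux rest 0 with
  | nil => simp
  | cons k t =>
    simp only [List.map_cons, Prod.mk.injEq]
    constructor
    · push_cast; ring
    · push_cast; ring

-- Phase 2: a free run has started at s, last free index j-1; A's loop from j returns
-- (s, first non-None position - 1), or (-1,-1) if the run reaches the end
lemma faLoop_phase2 (blocks : List (Option Int)) (s : Int) :
    ∀ j : Int, -(blocks.length : Int) ≤ j →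
    faLoop blocks (PySem.List.pyRange j (blocks.length : Int) 1) (some s) (some (j - 1)) =
      (match fsAux (bVals blocks j) 0 with
       | [] => (-1, -1)
       | k :: _ => (s, j + k - 1)) := by
  intro j
  induction' hfuel : ((blocks.length : Int) - j).toNat using Nat.strong_induction_on with fuel IH generalizing j
  intro hlo
  by_cases hlt : j < (blocks.length : Int)
  · obtain ⟨b, hb⟩ := pyGet?_isSome_of_inRange blocks j hlo hlt
    rw [PySem.List.pyRange_one_cons hlt, bVals_cons blocks j b hlt hb]
    simp only [faLoop, hb]
    cases b with
    | some v =>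
      rw [fsAux_cons_some]
      simp only [Option.isNone_some, Option.isSome_some, Bool.false_and, Bool.and_self,
        Bool.false_eq_true, if_false, if_true]
      simp only [Option.getD_some, Prod.mk.injEq]
      exact ⟨trivial, by ring⟩
    | none =>
      rw [fsAux_cons_none, fsAux_shift (bVals blocks (j + 1)) (0 + 1)]
      simp only [Option.isNone_some, Option.isNone_none, Option.isSome_some, Option.isSome_none,
        Bool.and_false, Bool.and_self, Bool.false_and, Bool.false_eq_true,
        if_false, ite_true]
      have hrec := IH (((blocks.length : Int) - (j + 1)).toNat) (by omega) (j + 1) rfl (by omega)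
      have hj : (j + 1 - 1 : Int) = j := by omega
      rw [hj] at hrec
      rw [hrec]
      cases fsAux (bVals blocks (j + 1)) 0 with
      | nil => simp
      | cons k t =>
        simp only [List.map_cons, Prod.mk.injEq]
        exact ⟨trivial, by ring⟩
  · rw [PySem.List.pyRange_one_eq_nil (by omega), bVals_nil blocks j (by omega)]
    simp [faLoop, fsAux_nil]

-- Phase 1: no run started yet; A's loop from i equals B on the window from i
lemma faLoop_phase1 (blocks : List (Option Int)) :
    ∀ i : Int, -(blocks.length : Int) ≤ i →
    faLoop blocks (PySem.List.pyRange i (blocks.length : Int) 1) none none =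
      bCore (bVals blocks i) i := by
  intro i
  induction' hfuel : ((blocks.length : Int) - i).toNat using Nat.strong_induction_on with fuel IH generalizing i
  intro hlo
  by_cases hlt : i < (blocks.length : Int)
  · obtain ⟨b, hb⟩ := pyGet?_isSome_of_inRange blocks i hlo hlt
    rw [PySem.List.pyRange_one_cons hlt, bVals_cons blocks i b hlt hb]
    simp only [faLoop, hb]
    cases b with
    | some v =>
      rw [bCore_cons_some]
      simp only [Option.isNone_some, Option.isSome_some,
        Bool.false_and, Bool.false_eq_true, if_false]
      exact IH (((blocks.length : Int) - (i + 1)).toNat) (by omega) (i + 1) rfl (by omega)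
    | none =>
      rw [bCore_cons_none]
      simp only [Option.isNone_none, Option.isSome_some, Option.isSome_none,
        Bool.and_self, Bool.false_and, Bool.false_eq_true, if_false, ite_true]
      have hrec := faLoop_phase2 blocks i (i + 1) (by omega)
      have hj : (i + 1 - 1 : Int) = i := by omega
      rw [hj] at hrec
      rw [hrec]
      cases fsAux (bVals blocks (i + 1)) 0 with
      | nil => simp
      | cons k t =>
        simp only [Prod.mk.injEq]
        exact ⟨trivial, by ring⟩
  · rw [PySem.List.pyRange_one_eq_nil (by omega), bVals_nil blocks i (by omega)]
    simp [faLoop, bCore]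

-- ===== VERDICT (by name: the statement is the Claim_ definition above) =====
theorem find_next_free_extent_spec : Claim_equal_find_next_free_extent := by
  intro blocks ptr _hdom hpre
  unfold Spec_find_next_free_extent find_next_free_extent find_next_free_extent_alt
  exact faLoop_phase1 blocks ptr hpre
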